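-- pv_equiv track=rewrite | github.com/iliyan-pigeon/Codewars_exercises | a_man_and_his_umbrellas.py | min_umbrellas
-- ===== SOURCE A (Python) =====
-- def min_umbrellas(weather):
--     umbrellas_needed = 0
--     umbrellas_home = 0
--     umbrellas_at_work = 0
--
--     for i in range(len(weather)):
--         if i % 2 == 0:
--             if weather[i] == 'rainy' or weather[i] == 'thunderstorms':
--                 if umbrellas_home > 0:
--                     umbrellas_home -= 1
--                 umbrellas_at_work += 1
--         else:
--             if weather[i] == 'rainy' or weather[i] == 'thunderstorms':
--                 if umbrellas_at_work > 0:
--                     umbrellas_at_work -= 1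
--                 umbrellas_home += 1
--
--     umbrellas_needed = umbrellas_home + umbrellas_at_work
--     return umbrellas_needed
-- ===== SOURCE B (Python) =====
-- def min_umbrellas(weather):
--     level = hi = lo = 0
--     for i, day in enumerate(weather):
--         if day in ('rainy', 'thunderstorms'):
--             level += 1 if i % 2 == 1 else -1
--             hi = max(hi, level)
--             lo = min(lo, level)
--     return hi - lo
-- ===== Notes on version B (the rewrite author's own statement) =====
-- stated objective: simpler
-- what changed: Replaces A's two clamped umbrella counters (home/work) by a single running level updated -1/+1 on rainy even/odd days, returning max(level)-min(level) observed; the conditional clamping disappears.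
import Mathlib
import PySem

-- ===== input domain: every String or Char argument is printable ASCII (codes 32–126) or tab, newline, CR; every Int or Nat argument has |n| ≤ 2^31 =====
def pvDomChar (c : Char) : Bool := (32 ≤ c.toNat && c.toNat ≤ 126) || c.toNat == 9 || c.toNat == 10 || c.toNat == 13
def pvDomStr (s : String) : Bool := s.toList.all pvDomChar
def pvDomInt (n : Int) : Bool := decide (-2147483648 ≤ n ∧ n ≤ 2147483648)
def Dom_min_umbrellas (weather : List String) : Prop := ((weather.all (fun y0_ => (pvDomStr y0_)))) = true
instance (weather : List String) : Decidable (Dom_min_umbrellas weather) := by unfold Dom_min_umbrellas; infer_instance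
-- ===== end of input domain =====

-- B replaces A's two clamped umbrella counters by a single running level whose observed
-- max−min span is the answer (objective: simpler; same O(n) cost).

-- ===== PORT A =====
-- A's loop over range(len(weather)): index i, two counters (home, work), clamped decrements.
def minUmbrellasGoA : List String → Int → Int → Int → Int × Int
  | [], _, home, work => (home, work)
  | x :: rest, i, home, work =>
    if i % 2 == 0 then
      if x == "rainy" || x == "thunderstorms" then
        minUmbrellasGoA rest (i + 1) (if home > 0 then home - 1 else home) (work + 1)
      else minUmbrellasGoA rest (i + 1) home work
    else
      if x == "rainy" || x == "thunderstorms" then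
        minUmbrellasGoA rest (i + 1) (home + 1) (if work > 0 then work - 1 else work)
      else minUmbrellasGoA rest (i + 1) home work

def min_umbrellas (weather : List String) : Int :=
  let r := minUmbrellasGoA weather 0 0 0
  r.1 + r.2

-- ===== PORT B =====
-- one step of B's enumerate loop: state (level, hi, lo)
def minUmbrellasStepB (s : Int × Int × Int) (p : Int × String) : Int × Int × Int :=
  if p.2 == "rainy" || p.2 == "thunderstorms" then
    let level := if p.1 % 2 == 1 then s.1 + 1 else s.1 - 1
    (level, max s.2.1 level, min s.2.2 level)
  else s

def min_umbrellas_alt (weather : List String) : Int :=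
  let r := (PySem.List.enumerate weather 0).foldl minUmbrellasStepB (0, 0, 0)
  r.2.1 - r.2.2

-- ===== PRECONDITION & SPEC =====
def Spec_min_umbrellas (weather : List String) (out : Int) : Prop := out = min_umbrellas_alt weather
instance (weather : List String) (out : Int) : Decidable (Spec_min_umbrellas weather out) := by unfold Spec_min_umbrellas; infer_instance

-- ===== CLAIM (what is proved, stated in full; the proofs are below) =====
def Claim_equal_min_umbrellas : Prop := ∀ (weather : List String), Dom_min_umbrellas weather → Spec_min_umbrellas weather (min_umbrellas weather)

-- ===== LEMMAS AND PROOFS =====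

-- B's fold over enumerate, written as structural recursion (proof helper only)
def minUmbrellasGoB : List String → Int → Int × Int × Int → Int × Int × Int
  | [], _, s => s
  | x :: rest, i, s => minUmbrellasGoB rest (i + 1) (minUmbrellasStepB s (i, x))

lemma foldl_enumerate_eq_goB : ∀ (ws : List String) (i : Int) (s : Int × Int × Int),
    (PySem.List.enumerate ws i).foldl minUmbrellasStepB s = minUmbrellasGoB ws i s := by
  intro ws
  induction ws with
  | nil => intro i s; simp [PySem.List.enumerate_nil, minUmbrellasGoB]
  | cons x rest ih =>
    intro i s
    simp [PySem.List.enumerate_cons, minUmbrellasGoB, ih]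

-- invariant: home = level - lo, work = hi - level
lemma goA_eq_goB : ∀ (ws : List String) (i level hi lo : Int), lo ≤ level → level ≤ hi →
    minUmbrellasGoA ws i (level - lo) (hi - level) =
      ((minUmbrellasGoB ws i (level, hi, lo)).1 - (minUmbrellasGoB ws i (level, hi, lo)).2.2,
       (minUmbrellasGoB ws i (level, hi, lo)).2.1 - (minUmbrellasGoB ws i (level, hi, lo)).1) := by
  intro ws
  induction ws with
  | nil => intro i level hi lo h1 h2; simp [minUmbrellasGoA, minUmbrellasGoB]
  | cons x rest ih =>
    intro i level hi lo h1 h2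
    by_cases hr : (x == "rainy" || x == "thunderstorms") = true
    · by_cases hp : i % 2 = 0
      · have hp1 : (i % 2 == 1) = false := by simp [hp]
        simp only [minUmbrellasGoA, minUmbrellasGoB, minUmbrellasStepB, hr, hp,
          beq_self_eq_true, if_true]
        have e1 : (if level - lo > 0 then level - lo - 1 else level - lo)
            = (level - 1) - min lo (level - 1) := by split_ifs <;> omega
        have e2 : hi - level + 1 = max hi (level - 1) - (level - 1) := by omega
        rw [e1, e2]
        exact ih (i + 1) (level - 1) (max hi (level - 1)) (min lo (level - 1))
          (by omega) (by omega)
      · have hp0 : (i % 2 == 0) = false := by simp [hp]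
        have hp1 : (i % 2 == 1) = true := by
          have : i % 2 = 0 ∨ i % 2 = 1 := Int.emod_two_eq_zero_or_one i
          simp [this.resolve_left hp]
        simp only [minUmbrellasGoA, minUmbrellasGoB, minUmbrellasStepB, hr, hp0, hp1,
          if_true, if_false, Bool.false_eq_true]
        have e1 : level - lo + 1 = (level + 1) - min lo (level + 1) := by omega
        have e2 : (if hi - level > 0 then hi - level - 1 else hi - level)
            = max hi (level + 1) - (level + 1) := by split_ifs <;> omega
        rw [e1, e2]
        exact ih (i + 1) (level + 1) (max hi (level + 1)) (min lo (level + 1))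
          (by omega) (by omega)
    · simp only [minUmbrellasGoA, minUmbrellasGoB, minUmbrellasStepB, hr,
        Bool.false_eq_true, if_false, ite_self]
      exact ih (i + 1) level hi lo h1 h2

-- ===== VERDICT (by name: the statement is the Claim_ definition above) =====
theorem min_umbrellas_spec : Claim_equal_min_umbrellas := by
  intro weather _
  unfold Spec_min_umbrellas min_umbrellas min_umbrellas_alt
  rw [foldl_enumerate_eq_goB]
  have h := goA_eq_goB weather 0 0 0 0 le_rfl le_rfl
  simp only [sub_zero] at h
  rw [h]
  dsimp only
  omega
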